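-- pv_equiv track=rewrite | github.com/Sovik89/Scaler_inter_n_advanced | intermediate_contest1_max_sum_in_bag.py | solve
-- ===== SOURCE A (Python) =====
-- def solve(A,B,C):
--     n = len(A)
--
--     sum_1=0
--     sum_0=0
--     max_sum=0
--     for i in range(n):
--         # We are taking the sum for A[i] where B[i]=1, This is always getiing added in sum_1 and sum_0 is getting
--         # added by A[i] where B[i] =0
--         # now we are taking a window of C when value of sum_0 with the B[i] for upcoming value where B[i] =0
--         sum_1+=(B[i]*A[i])
--         sum_0+=((1-B[i])*A[i])
--         if i >=C:
--             sum_0-=(1-B[i-C])*A[i-C]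
--         max_sum=max(max_sum,sum_0)
--
--     return max_sum+sum_1
-- ===== SOURCE B (Python) =====
-- def solve(A, B, C):
--     n = len(A)
--     z = [(1 - B[i]) * A[i] for i in range(n)]
--     sum_1 = sum(B[i] * A[i] for i in range(n))
--     P = [0]
--     for v in z:
--         P.append(P[-1] + v)
--     max_sum = 0
--     for i in range(n):
--         w = P[i + 1] - P[max(0, i + 1 - C)]
--         if w > max_sum:
--             max_sum = w
--     return max_sum + sum_1
-- ===== Notes on version B (the rewrite author's own statement) =====
-- stated objective: alternative
-- what changed: Replaces the incremental sliding-window accumulator (add new element, conditionally subtract the element leaving the window, running max inside the same loop) by a two-pass prefix-sum computation: build the prefix-sum table of the zero-contribution values and the total one-sum in a first pass, then read each window sum off the table as P[i+1]-P[max(0,i+1-C)] in a second pass.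
import Mathlib
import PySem

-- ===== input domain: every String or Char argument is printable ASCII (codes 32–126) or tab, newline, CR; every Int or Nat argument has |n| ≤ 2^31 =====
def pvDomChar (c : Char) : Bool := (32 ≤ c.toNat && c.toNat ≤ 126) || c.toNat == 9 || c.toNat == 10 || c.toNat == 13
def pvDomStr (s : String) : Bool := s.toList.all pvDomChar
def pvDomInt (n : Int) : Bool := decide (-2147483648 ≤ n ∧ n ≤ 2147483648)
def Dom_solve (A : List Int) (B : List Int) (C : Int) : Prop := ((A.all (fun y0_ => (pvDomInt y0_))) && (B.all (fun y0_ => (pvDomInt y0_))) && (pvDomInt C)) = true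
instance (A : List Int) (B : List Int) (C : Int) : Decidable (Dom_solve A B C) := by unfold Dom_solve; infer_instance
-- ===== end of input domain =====

-- B replaces A's incremental sliding-window accumulator by a two-pass prefix-sum-table
-- computation (same O(n) cost, a different decomposition); equivalence of return values.

-- ===== PORT A =====
-- literal port of A's single loop with state (sum_1, sum_0, max_sum)
def solve (A : List Int) (B : List Int) (C : Int) : Int :=
  let n := A.length
  let st := (PySem.List.pyRange 0 (n : Int) 1).foldl
    (fun (s : Int × Int × Int) i =>
      let sum1 := s.1 + PySem.List.pyGetD B i 0 * PySem.List.pyGetD A i 0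
      let sum0 := s.2.1 + (1 - PySem.List.pyGetD B i 0) * PySem.List.pyGetD A i 0
      let sum0 := if C ≤ i then
          sum0 - (1 - PySem.List.pyGetD B (i - C) 0) * PySem.List.pyGetD A (i - C) 0
        else sum0
      (sum1, sum0, max s.2.2 sum0))
    (0, 0, 0)
  st.2.2 + st.1

-- ===== PORT B =====
-- literal port of Source B: zero-contribution list z, its prefix-sum table P built by appending
-- P[-1]+v, the total one-sum, then a second loop reading window sums off P
def solve_alt (A : List Int) (B : List Int) (C : Int) : Int :=
  let n := A.length
  let z := (PySem.List.pyRange 0 (n : Int) 1).map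
    (fun i => (1 - PySem.List.pyGetD B i 0) * PySem.List.pyGetD A i 0)
  let sum1 := ((PySem.List.pyRange 0 (n : Int) 1).map
    (fun i => PySem.List.pyGetD B i 0 * PySem.List.pyGetD A i 0)).sum
  let P := z.foldl (fun acc v => acc ++ [PySem.List.pyGetD acc (-1) 0 + v]) [0]
  let maxSum := (PySem.List.pyRange 0 (n : Int) 1).foldl
    (fun m i =>
      let w := PySem.List.pyGetD P (i + 1) 0 - PySem.List.pyGetD P (max 0 (i + 1 - C)) 0
      if m < w then w else m)
    0
  maxSum + sum1

-- ===== PRECONDITION & SPEC =====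
-- Pre_ excludes exactly the inputs on which A raises IndexError: B shorter than A
-- (B[i] out of range), or a negative window size C with A nonempty (A[i-C] runs past the end).
def Pre_solve (A : List Int) (B : List Int) (C : Int) : Prop :=
  A.length ≤ B.length ∧ (0 ≤ C ∨ A = [])
instance (A : List Int) (B : List Int) (C : Int) : Decidable (Pre_solve A B C) := by
  unfold Pre_solve; infer_instance

def pvWitness_solve : List Int × List Int × Int := ([3, -1, 4, -2], [0, 1, 0, 0], 2)

def Spec_solve (A : List Int) (B : List Int) (C : Int) (out : Int) : Prop := out = solve_alt A B C
instance (A : List Int) (B : List Int) (C : Int) (out : Int) : Decidable (Spec_solve A B C out) := by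
  unfold Spec_solve; infer_instance

-- ===== CLAIM (what is proved, stated in full; the proofs are below) =====
def Claim_equal_solve : Prop :=
  ∀ (A : List Int) (B : List Int) (C : Int), Dom_solve A B C → Pre_solve A B C →
    Spec_solve A B C (solve A B C)

-- ===== LEMMAS AND PROOFS =====

-- the zero-contribution value and the one-contribution value at index j
def pvZ (A B : List Int) (j : Nat) : Int := (1 - B.getD j 0) * A.getD j 0
def pvO (A B : List Int) (j : Nat) : Int := B.getD j 0 * A.getD j 0
-- prefix sums of pvZ, and the one-sum
def pvS (A B : List Int) (k : Nat) : Int := ((List.range k).map (pvZ A B)).sum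
def pvT (A B : List Int) (k : Nat) : Int := ((List.range k).map (pvO A B)).sum
-- A's window value after k steps (c = C.toNat), and the running maximum
def pvW (A B : List Int) (c : Nat) (k : Nat) : Int := pvS A B k - pvS A B (k - c)
def pvM (A B : List Int) (c : Nat) : Nat → Int
  | 0 => 0
  | k + 1 => max (pvM A B c k) (pvW A B c (k + 1))

theorem pvS_succ (A B : List Int) (k : Nat) :
    pvS A B (k + 1) = pvS A B k + pvZ A B k := by
  simp [pvS, List.range_succ]

theorem pvT_succ (A B : List Int) (k : Nat) :
    pvT A B (k + 1) = pvT A B k + pvO A B k := by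
  simp [pvT, List.range_succ]

-- A's loop invariant
theorem solve_foldl_inv (A B : List Int) (C : Int) (hC : 0 <= C) (k : Nat) :
    (List.range k).foldl
      (fun (s : Int × Int × Int) (j : Nat) =>
        let sum1 := s.1 + PySem.List.pyGetD B (j : Int) 0 * PySem.List.pyGetD A (j : Int) 0
        let sum0 := s.2.1 + (1 - PySem.List.pyGetD B (j : Int) 0) * PySem.List.pyGetD A (j : Int) 0
        let sum0 := if C <= (j : Int) then
            sum0 - (1 - PySem.List.pyGetD B ((j : Int) - C) 0) * PySem.List.pyGetD A ((j : Int) - C) 0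
          else sum0
        (sum1, sum0, max s.2.2 sum0))
      (0, 0, 0)
    = (pvT A B k, pvW A B C.toNat k, pvM A B C.toNat k) := by
  induction k with
  | zero => simp [pvT, pvW, pvS, pvM]
  | succ k ih =>
    rw [List.range_succ, List.foldl_append, ih]
    simp only [List.foldl_cons, List.foldl_nil]
    by_cases hck : C <= (k : Int)
    · have hcast : ((k : Int)) - C = ((k - C.toNat : Nat) : Int) := by omega
      simp only [hck, if_pos, hcast, PySem.List.pyGetD_natCast]
      refine Prod.ext ?_ (Prod.ext ?_ ?_)
      · simp [pvT_succ, pvO, mul_comm]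
      · simp only [pvW, pvS_succ]
        have h1 : k + 1 - C.toNat = (k - C.toNat) + 1 := by omega
        rw [h1, pvS_succ]
        simp [pvZ]; ring
      · simp only [pvM]
        congr 1
        simp only [pvW, pvS_succ]
        have h1 : k + 1 - C.toNat = (k - C.toNat) + 1 := by omega
        rw [h1, pvS_succ]
        simp [pvZ]; ring
    · simp only [hck, if_neg, not_false_iff, PySem.List.pyGetD_natCast]
      have h1 : k + 1 - C.toNat = 0 := by omega
      have h2 : k - C.toNat = 0 := by omega
      refine Prod.ext ?_ (Prod.ext ?_ ?_)
      · simp [pvT_succ, pvO, mul_comm]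
      · simp only [pvW, pvS_succ, h1, h2]
        simp [pvZ, pvS]
      · simp only [pvM]
        congr 1
        simp only [pvW, pvS_succ, h1, h2]
        simp [pvZ, pvS]

-- the hand-built prefix list: foldl with append of P[-1]+v
def pvPref (l : List Int) (s : Int) : List Int :=
  match l with
  | [] => []
  | v :: t => (s + v) :: pvPref t (s + v)

theorem pvPref_foldl (l : List Int) (acc : List Int) (x : Int) :
    l.foldl (fun acc v => acc ++ [PySem.List.pyGetD acc (-1) 0 + v]) (acc ++ [x])
      = (acc ++ [x]) ++ pvPref l x := by
  induction l generalizing acc x with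
  | nil => simp [pvPref]
  | cons v t ih =>
    simp only [List.foldl_cons, PySem.List.pyGetD_neg_one_append_singleton]
    have := ih (acc ++ [x]) (x + v)
    simp only [List.append_assoc] at this ⊢
    rw [this]
    simp [pvPref]

theorem pvPref_eq_map (l : List Int) (s : Int) :
    pvPref l s = (List.range l.length).map (fun k => s + (l.take (k + 1)).sum) := by
  induction l generalizing s with
  | nil => simp [pvPref]
  | cons v t ih =>
    simp only [pvPref, List.length_cons, List.range_succ_eq_map, List.map_cons, List.map_map]
    rw [ih (s + v)]
    simp [Function.comp, add_assoc]

-- P is the prefix-sum table of z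
theorem pvP_eq (A B : List Int) :
    (((PySem.List.pyRange 0 (A.length : Int) 1).map
        (fun i => (1 - PySem.List.pyGetD B i 0) * PySem.List.pyGetD A i 0)).foldl
      (fun acc v => acc ++ [PySem.List.pyGetD acc (-1) 0 + v]) [0])
    = (List.range (A.length + 1)).map (pvS A B) := by
  have hz : ((PySem.List.pyRange 0 (A.length : Int) 1).map
      (fun i => (1 - PySem.List.pyGetD B i 0) * PySem.List.pyGetD A i 0))
      = (List.range A.length).map (pvZ A B) := by
    rw [PySem.List.pyRange_zero_nat, List.map_map]
    refine List.map_congr_left ?_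
    intro k _
    simp [pvZ, PySem.List.pyGetD_natCast]
  rw [hz]
  have h0 : ([ (0:Int) ] : List Int) = [] ++ [(0:Int)] := by simp
  rw [h0, pvPref_foldl, pvPref_eq_map]
  rw [List.range_succ_eq_map, List.map_cons, List.map_map]
  simp only [List.length_map, List.length_range, List.nil_append, List.cons_append,
    List.nil_append]
  congr 1
  refine List.map_congr_left ?_
  intro k hk
  simp only [List.mem_range] at hk
  simp only [Function.comp_apply, zero_add]
  rw [← List.map_take, List.take_range, min_eq_left (by omega)]
  simp [pvS]

theorem pvP_getD (A B : List Int) (j : Nat) (hj : j <= A.length) :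
    PySem.List.pyGetD ((List.range (A.length + 1)).map (pvS A B)) ((j : Nat) : Int) 0
      = pvS A B j := by
  rw [PySem.List.pyGetD_natCast]
  rw [List.getD_eq_getElem?_getD, List.getElem?_map, List.getElem?_range (by omega)]
  simp

-- B's max loop invariant
theorem solve_alt_foldl_inv (A B : List Int) (C : Int) (hC : 0 <= C) (k : Nat)
    (hk : k <= A.length) :
    (List.range k).foldl
      (fun (m : Int) (j : Nat) =>
        let w := PySem.List.pyGetD ((List.range (A.length + 1)).map (pvS A B)) ((j : Int) + 1) 0
          - PySem.List.pyGetD ((List.range (A.length + 1)).map (pvS A B)) (max 0 ((j : Int) + 1 - C)) 0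
        if m < w then w else m)
      0
    = pvM A B C.toNat k := by
  induction k with
  | zero => simp [pvM]
  | succ k ih =>
    rw [show List.range (k + 1) = List.range k ++ [k] from List.range_succ,
       List.foldl_append, ih (by omega)]
    simp only [List.foldl_cons, List.foldl_nil]
    have e1 : ((k : Int)) + 1 = (((k + 1 : Nat)) : Int) := by push_cast; ring
    have e2 : max 0 ((k : Int) + 1 - C) = (((k + 1 - C.toNat : Nat)) : Int) := by
      rw [max_def]; split_ifs with h <;> omega
    rw [e2, e1, pvP_getD A B (k + 1) (by omega), pvP_getD A B (k + 1 - C.toNat) (by omega)]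
    simp only [pvM]
    have hW : pvW A B C.toNat (k + 1) = pvS A B (k + 1) - pvS A B (k + 1 - C.toNat) := rfl
    rw [hW, max_def]
    split_ifs with h1 h2 h2
    · rfl
    · omega
    · omega
    · rfl

-- agreement for the empty list (the Pre_ branch that allows negative C)
theorem solve_nil (B : List Int) (C : Int) : solve [] B C = solve_alt [] B C := by
  simp [solve, solve_alt]

theorem solve_eq (A B : List Int) (C : Int) (hC : 0 <= C) :
    solve A B C = solve_alt A B C := by
  unfold solve solve_alt
  simp only []
  rw [pvP_eq A B]
  have hT : ((PySem.List.pyRange 0 (A.length : Int) 1).map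
      (fun i => PySem.List.pyGetD B i 0 * PySem.List.pyGetD A i 0)).sum = pvT A B A.length := by
    rw [PySem.List.pyRange_zero_nat, List.map_map]
    unfold pvT
    congr 1
    refine List.map_congr_left ?_
    intro k _
    simp [pvO, PySem.List.pyGetD_natCast]
  rw [hT]
  rw [PySem.List.pyRange_zero_nat, List.foldl_map, List.foldl_map]
  rw [solve_foldl_inv A B C hC A.length,
      solve_alt_foldl_inv A B C hC A.length (le_refl _)]

-- ===== VERDICT (by name: the statement is the Claim_ definition above) =====
theorem solve_spec : Claim_equal_solve := by
  intro A B C _ hPre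
  unfold Spec_solve
  rcases hPre with ⟨_, hC | hA⟩
  · exact solve_eq A B C hC
  · subst hA; exact solve_nil B C
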